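-- pv_equiv track=rewrite | github.com/domster704/adm-lab-1 | main_calc_v5.py | transformArrayWithHex
-- ===== SOURCE A (Python) =====
-- def transformArrayWithHex(array, alphabet):
--     new_array = []
--     current_hex_number = ''
--     for index in range(len(array)):
--         if array[index] in alphabet or array[index] == '.':
--             current_hex_number += array[index]
--         elif current_hex_number != '':
--             new_array.append(current_hex_number)
--             new_array.append(array[index])
--             current_hex_number = ''
--         else:
--             new_array.append(array[index])
--
--     if current_hex_number != '':
--         new_array.append(current_hex_number)
--     return new_array
-- ===== SOURCE B (Python) =====
-- def transformArrayWithHex(array, alphabet):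
--     # Run-scanning two-pointer rewrite: split the array into maximal runs of
--     # hex/non-hex elements; join each hex run, emit other runs element-wise.
--     def is_hex(c):
--         return c in alphabet or c == '.'
--     result = []
--     i = 0
--     n = len(array)
--     while i < n:
--         h = is_hex(array[i])
--         j = i
--         while j < n and is_hex(array[j]) == h:
--             j += 1
--         if h:
--             result.append(''.join(array[i:j]))
--         else:
--             result.extend(array[i:j])
--         i = j
--     return result
-- ===== Notes on version B (the rewrite author's own statement) =====
-- stated objective: alternative
-- what changed: B replaces A's character-accumulator-with-trailing-flush loop by a two-pointer run scanner: it finds each maximal run of hex/non-hex elements, joins hex runs and emits other runs element-wise, so there is no pending-string state or flush.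
-- outside the precondition, e.g. on transformArrayWithHex(['', 'x'], ['']): A returns ['x'], B returns ['', 'x']
import Mathlib
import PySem

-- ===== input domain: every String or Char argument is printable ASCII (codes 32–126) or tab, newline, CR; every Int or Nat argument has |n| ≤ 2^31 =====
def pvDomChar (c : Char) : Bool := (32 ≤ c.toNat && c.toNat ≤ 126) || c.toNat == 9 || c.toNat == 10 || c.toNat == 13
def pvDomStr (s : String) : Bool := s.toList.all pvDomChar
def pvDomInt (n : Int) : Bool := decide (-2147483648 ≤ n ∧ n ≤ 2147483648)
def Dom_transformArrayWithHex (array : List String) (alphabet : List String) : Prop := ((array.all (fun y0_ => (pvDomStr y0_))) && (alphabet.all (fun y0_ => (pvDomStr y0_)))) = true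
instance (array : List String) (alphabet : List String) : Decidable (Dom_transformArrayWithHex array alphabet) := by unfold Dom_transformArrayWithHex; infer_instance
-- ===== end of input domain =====

-- ===== PORT A =====
-- B replaces A's accumulator-with-flush loop by a maximal-run scanner (alternative decomposition).
-- Port of A: foldl over the array carrying (new_array, current_hex_number), final flush.
def transformArrayWithHex (array : List String) (alphabet : List String) : List String :=
  let r := array.foldl
    (fun (st : List String × String) x =>
      if alphabet.contains x || x == "." then (st.1, st.2 ++ x)
      else if st.2 ≠ "" then (st.1 ++ [st.2, x], "")
      else (st.1 ++ [x], ""))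
    ([], "")
  if r.2 ≠ "" then r.1 ++ [r.2] else r.1

-- ===== PORT B =====
-- Port of B: the outer while loop = recursion on the list; the inner scan for the end of the
-- current maximal run (j) = takeWhile/dropWhile with the predicate `same is_hex as the run head`.
def pvAltGo (key : String → Bool) : List String → List String
  | [] => []
  | x :: xs =>
    let run := x :: xs.takeWhile (fun y => key y == key x)
    let rest := xs.dropWhile (fun y => key y == key x)
    if key x then String.join run :: pvAltGo key rest else run ++ pvAltGo key rest
termination_by l => l.length
decreasing_by
  all_goals
    simp only [List.length_cons]
    exact Nat.lt_succ_of_le (List.length_dropWhile_le _ _)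

def transformArrayWithHex_alt (array : List String) (alphabet : List String) : List String :=
  pvAltGo (fun c => alphabet.contains c || c == ".") array

-- ===== PRECONDITION & SPEC =====
-- Pre_ excludes arrays containing the empty string while the empty string is also in the
-- alphabet: there A silently drops the empty element (its accumulator cannot distinguish
-- "nothing pending" from a pending empty token) while B emits an empty token — both
-- behaviours are defensible on this degenerate corner, so it is excluded.
def Pre_transformArrayWithHex (array : List String) (alphabet : List String) : Prop :=
  ¬ ("" ∈ array ∧ "" ∈ alphabet)
instance (array : List String) (alphabet : List String) : Decidable (Pre_transformArrayWithHex array alphabet) := by unfold Pre_transformArrayWithHex; infer_instance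
def pvWitness_transformArrayWithHex : List String × List String :=
  (["1", "a", "+", "2", ".", "f", " "], ["0","1","2","a","b","f"])
def Spec_transformArrayWithHex (array : List String) (alphabet : List String) (out : List String) : Prop := out = transformArrayWithHex_alt array alphabet
instance (array : List String) (alphabet : List String) (out : List String) : Decidable (Spec_transformArrayWithHex array alphabet out) := by unfold Spec_transformArrayWithHex; infer_instance

-- ===== CLAIM (what is proved, stated in full; the proofs are below) =====
def Claim_equal_transformArrayWithHex : Prop := ∀ (array : List String) (alphabet : List String), Dom_transformArrayWithHex array alphabet → Pre_transformArrayWithHex array alphabet → Spec_transformArrayWithHex array alphabet (transformArrayWithHex array alphabet)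

-- ===== LEMMAS AND PROOFS =====

theorem pv_append_ne_empty (s t : String) (h : s ≠ "") : s ++ t ≠ "" := by
  intro he
  have hl := congrArg String.length he
  simp [String.length_append] at hl
  exact h (by rw [← String.length_eq_zero_iff] at *; omega)

theorem pv_join_foldl (l : List String) : ∀ (a : String),
    List.foldl (fun r s => r ++ s) a l = a ++ String.join l := by
  induction l with
  | nil =>
      intro a
      have h0 : String.join ([] : List String) = "" := rfl
      simp [h0]
  | cons x l ih =>
      intro a
      rw [List.foldl_cons, ih]
      have h2 : String.join (x :: l) = List.foldl (fun r s => r ++ s) ("" ++ x) l := rfl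
      rw [h2, ih]
      simp [String.append_assoc]

theorem pv_join_cons (x : String) (l : List String) :
    String.join (x :: l) = x ++ String.join l := by
  have h2 : String.join (x :: l) = List.foldl (fun r s => r ++ s) ("" ++ x) l := rfl
  rw [h2, pv_join_foldl]
  simp

-- A's loop, written as direct recursion on the list with the pending string as argument.
def pvS (key : String → Bool) : List String → String → List String
  | [], cur => if cur = "" then [] else [cur]
  | x :: xs, cur =>
      if key x then pvS key xs (cur ++ x)
      else (if cur = "" then [] else [cur]) ++ x :: pvS key xs ""

-- B's scanner with a nonempty pending hex prefix merged into the first run.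
def pvPendGo (key : String → Bool) (cur : String) : List String → List String
  | [] => [cur]
  | x :: xs =>
      if key x then
        (cur ++ String.join (x :: xs.takeWhile (fun y => key y == key x))) ::
          pvAltGo key (xs.dropWhile (fun y => key y == key x))
      else cur :: pvAltGo key (x :: xs)

theorem pv_foldl_S (key : String → Bool) (alphabet : List String)
    (hk : ∀ x, key x = (alphabet.contains x || x == ".")) :
    ∀ (xs : List String) (acc : List String) (cur : String),
      (let r := xs.foldl
        (fun (st : List String × String) x =>
          if alphabet.contains x || x == "." then (st.1, st.2 ++ x)
          else if st.2 ≠ "" then (st.1 ++ [st.2, x], "")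
          else (st.1 ++ [x], "")) (acc, cur)
       if r.2 ≠ "" then r.1 ++ [r.2] else r.1) = acc ++ pvS key xs cur := by
  intro xs
  induction xs with
  | nil =>
      intro acc cur
      by_cases h : cur = "" <;> simp [pvS, h]
  | cons x xs ih =>
      intro acc cur
      by_cases h : key x
      · have h' : (alphabet.contains x || x == ".") = true := by rw [← hk]; exact h
        simp only [List.foldl_cons, h', if_pos rfl, pvS, h, if_pos]
        exact ih acc (cur ++ x)
      · have h' : ¬ ((alphabet.contains x || x == ".") = true) := by rw [← hk]; simpa using h
        by_cases hc : cur = ""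
        · simp only [List.foldl_cons, if_neg h', hc, ne_eq, not_true_eq_false, if_neg,
            not_false_eq_true, pvS, h]
          simpa [hc] using ih (acc ++ [x]) ""
        · simp only [List.foldl_cons, if_neg h', if_pos hc, pvS, h]
          have := ih (acc ++ [cur, x]) ""
          simp only [ne_eq, hc, not_false_eq_true, if_pos] at this ⊢
          simpa [hc] using this

theorem pv_altGo_cons_false (key : String → Bool) (x : String) (xs : List String)
    (h : key x = false) : pvAltGo key (x :: xs) = x :: pvAltGo key xs := by
  cases xs with
  | nil => simp [pvAltGo, h]
  | cons y ys =>
      by_cases hy : key y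
      · simp [pvAltGo, h, hy]
      · have hy' : key y = false := by simpa using hy
        have hfun : (fun z => key z == key x) = (fun z => key z == key y) := by
          funext z; rw [h, hy']
        simp only [pvAltGo, h, hy', List.takeWhile_cons, List.dropWhile_cons, hfun]
        simp [pvAltGo, h, hy', hfun]

theorem pv_S_altGo (key : String → Bool) :
    ∀ (xs : List String), (∀ x ∈ xs, key x = true → x ≠ "") →
      (pvS key xs "" = pvAltGo key xs ∧
       ∀ cur, cur ≠ "" → pvS key xs cur = pvPendGo key cur xs) := by
  intro xs
  induction xs with
  | nil =>
      intro _
      constructor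
      · simp [pvS, pvAltGo]
      · intro cur hc; simp [pvS, hc, pvPendGo]
  | cons x xs ih =>
      intro H
      have Hxs : ∀ y ∈ xs, key y = true → y ≠ "" := fun y hy => H y (List.mem_cons_of_mem _ hy)
      obtain ⟨ih1, ih2⟩ := ih Hxs
      by_cases h : key x
      · have hx : x ≠ "" := H x List.mem_cons_self h
        have merge : ∀ c, c ≠ "" → pvPendGo key c (x :: xs) = pvPendGo key (c ++ x) xs := by
          intro c hc
          cases xs with
          | nil => simp [pvPendGo, h, pvAltGo, pv_join_cons, String.join]
          | cons y ys =>
              by_cases hy : key y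
              · have hfun : (fun z => key z == key y) = (fun z => key z == key x) := by
                  funext z; simp [h, hy]
                simp [pvPendGo, h, hy, List.takeWhile, List.dropWhile, pv_join_cons, hfun,
                  String.append_assoc]
              · simp [pvPendGo, h, hy, List.takeWhile, List.dropWhile, pv_join_cons,
                  pvAltGo, String.join]
        constructor
        · have : pvS key (x :: xs) "" = pvS key xs x := by simp [pvS, h]
          rw [this, ih2 x hx]
          cases xs with
          | nil => simp [pvPendGo, pvAltGo, pv_join_cons, String.join]
          | cons y ys =>
              by_cases hy : key y
              · have hfun : (fun z => key z == key y) = (fun z => key z == key x) := by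
                  funext z; simp [h, hy]
                simp [pvPendGo, h, hy, pvAltGo, List.takeWhile, List.dropWhile, pv_join_cons, hfun]
              · simp [pvPendGo, h, hy, pvAltGo, List.takeWhile, List.dropWhile, pv_join_cons,
                  String.join]
        · intro cur hc
          have : pvS key (x :: xs) cur = pvS key xs (cur ++ x) := by simp [pvS, h]
          rw [this, ih2 _ (pv_append_ne_empty cur x hc), merge cur hc]
      · have hfalse : key x = false := Bool.eq_false_iff.mpr h
        constructor
        · simp only [pvS, hfalse, Bool.false_eq_true, if_neg, not_false_eq_true, if_pos rfl]
          rw [pv_altGo_cons_false key x xs hfalse, ih1]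
          simp
        · intro cur hc
          simp only [pvS, hfalse, Bool.false_eq_true, if_neg, not_false_eq_true, if_neg hc,
            pvPendGo]
          rw [pv_altGo_cons_false key x xs hfalse, ih1]
          simp [hc]

-- ===== VERDICT (by name: the statement is the Claim_ definition above) =====
theorem transformArrayWithHex_spec : Claim_equal_transformArrayWithHex := by
  intro array alphabet _ hpre
  unfold Spec_transformArrayWithHex transformArrayWithHex transformArrayWithHex_alt
  have H : ∀ x ∈ array, (fun c => alphabet.contains c || c == ".") x = true → x ≠ "" := by
    intro x hx hk he
    subst he
    rcases Bool.or_eq_true_iff.mp hk with h1 | h1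
    · exact hpre ⟨hx, by simpa using h1⟩
    · exact absurd h1 (by decide)
  have h1 := pv_foldl_S (fun c => alphabet.contains c || c == ".") alphabet (fun x => rfl) array [] ""
  have h2 := (pv_S_altGo (fun c => alphabet.contains c || c == ".") array H).1
  rw [h2] at h1
  simpa using h1
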